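-- pv_equiv track=rewrite | github.com/patelinadev/sync-practice | geometry_utils.py | draw_hollow_square
-- ===== SOURCE A (Python) =====
-- def draw_hollow_square(side_length: int):
--     result = ""
--     for i in range(side_length):
--         if i == 0 or i == side_length - 1:
--             result += "*" * side_length
--             result += "\n"
--         else:
--             result += "*"
--             result += " " * (side_length - 2)
--             result += "*"
--             result += "\n"
--
--     return result
-- ===== SOURCE B (Python) =====
-- def draw_hollow_square(side_length: int):
--     if side_length <= 0:
--         return ""
--     border = "*" * side_length + "\n"
--     if side_length == 1:
--         rows = [border]
--     else:
--         middle = "*" + " " * (side_length - 2) + "*\n"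
--         rows = [border] + [middle] * (side_length - 2) + [border]
--     return "".join(rows)
-- ===== Notes on version B (the rewrite author's own statement) =====
-- stated objective: simpler
-- what changed: Replaces A's per-row loop with a two-case branch by a loop-free closed-form assembly: build the border row and middle row once, replicate the middle row, and join the row list.
import Mathlib
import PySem

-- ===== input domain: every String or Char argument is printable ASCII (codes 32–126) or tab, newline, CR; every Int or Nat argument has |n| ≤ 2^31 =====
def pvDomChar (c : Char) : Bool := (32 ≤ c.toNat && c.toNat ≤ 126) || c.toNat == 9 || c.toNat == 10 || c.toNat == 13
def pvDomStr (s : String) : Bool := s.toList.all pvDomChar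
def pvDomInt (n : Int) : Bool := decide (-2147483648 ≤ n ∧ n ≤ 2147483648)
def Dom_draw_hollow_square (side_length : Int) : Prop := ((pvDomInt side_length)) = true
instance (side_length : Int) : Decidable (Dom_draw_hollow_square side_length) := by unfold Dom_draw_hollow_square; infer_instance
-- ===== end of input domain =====

-- B replaces A's per-row branching loop by a loop-free closed-form assembly of precomputed row templates (simpler).

-- ===== PORT A =====
-- port of A: fold over range(side_length); "*" * k is List.replicate k.toNat (Python gives "" for k < 0, as toNat clamps)
def draw_hollow_square (side_length : Int) : String :=
  String.ofList ((PySem.List.pyRange 0 side_length 1).foldl (fun result i =>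
    if i == 0 || i == side_length - 1 then
      result ++ List.replicate side_length.toNat '*' ++ ['\n']
    else
      result ++ '*' :: (List.replicate (side_length - 2).toNat ' ' ++ ['*', '\n'])) [])

-- ===== PORT B =====
-- port of B: precompute border and middle rows, replicate, join ("".join over char lists = flatten)
def draw_hollow_square_alt (side_length : Int) : String :=
  if side_length ≤ 0 then String.ofList []
  else
    let border := List.replicate side_length.toNat '*' ++ ['\n']
    let rows :=
      if side_length == 1 then [border]
      else
        let middle := '*' :: (List.replicate (side_length - 2).toNat ' ' ++ ['*', '\n'])
        [border] ++ List.replicate (side_length - 2).toNat middle ++ [border]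
    String.ofList rows.flatten

-- ===== PRECONDITION & SPEC =====
def Spec_draw_hollow_square (side_length : Int) (out : String) : Prop := out = draw_hollow_square_alt side_length
instance (side_length : Int) (out : String) : Decidable (Spec_draw_hollow_square side_length out) := by unfold Spec_draw_hollow_square; infer_instance

-- ===== CLAIM (what is proved, stated in full; the proofs are below) =====
def Claim_equal_draw_hollow_square : Prop := ∀ (side_length : Int), Dom_draw_hollow_square side_length → Spec_draw_hollow_square side_length (draw_hollow_square side_length)

-- ===== LEMMAS AND PROOFS =====

-- a fold that appends the same block each step is the flattened replication of that block
lemma foldl_append_const {α : Type} (l : List α) (m acc : List Char) :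
    l.foldl (fun a _ => a ++ m) acc = acc ++ (List.replicate l.length m).flatten := by
  induction l generalizing acc with
  | nil => simp
  | cons x xs ih => simp [ih, List.replicate_succ]

-- A's step on a middle index (0 < i < n - 1) appends the middle row
lemma stepA_middle (n i : Int) (h0 : 0 < i) (h1 : i < n - 1) (acc : List Char) :
    (if i == 0 || i == n - 1 then
      acc ++ List.replicate n.toNat '*' ++ ['\n']
    else
      acc ++ '*' :: (List.replicate (n - 2).toNat ' ' ++ ['*', '\n']))
    = acc ++ '*' :: (List.replicate (n - 2).toNat ' ' ++ ['*', '\n']) := by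
  have hi0 : (i == 0) = false := by simp; omega
  have hi1 : (i == n - 1) = false := by simp; omega
  rw [hi0, hi1]
  simp

-- A's fold over the middle indices accumulates replicated middle rows
lemma foldA_middle (n : Int) (acc : List Char) :
    (PySem.List.pyRange 1 (n - 1) 1).foldl (fun result i =>
      if i == 0 || i == n - 1 then
        result ++ List.replicate n.toNat '*' ++ ['\n']
      else
        result ++ '*' :: (List.replicate (n - 2).toNat ' ' ++ ['*', '\n'])) acc
    = acc ++ (List.replicate (n - 2).toNat
        ('*' :: (List.replicate (n - 2).toNat ' ' ++ ['*', '\n']))).flatten := by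
  have hstep : (PySem.List.pyRange 1 (n - 1) 1).foldl (fun result i =>
      if i == 0 || i == n - 1 then
        result ++ List.replicate n.toNat '*' ++ ['\n']
      else
        result ++ '*' :: (List.replicate (n - 2).toNat ' ' ++ ['*', '\n'])) acc
      = (PySem.List.pyRange 1 (n - 1) 1).foldl
        (fun a _ => a ++ '*' :: (List.replicate (n - 2).toNat ' ' ++ ['*', '\n'])) acc := by
    apply PySem.List.foldl_congr_mem
    intro a i hi
    rw [PySem.List.mem_pyRange_one] at hi
    exact stepA_middle n i (by omega) (by omega) a
  rw [hstep, foldl_append_const]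
  congr 2
  rw [PySem.List.length_pyRange_one]
  congr 1; omega

-- ===== VERDICT (by name: the statement is the Claim_ definition above) =====
theorem draw_hollow_square_spec : Claim_equal_draw_hollow_square := by
  intro n _
  unfold Spec_draw_hollow_square draw_hollow_square draw_hollow_square_alt
  by_cases hpos : n ≤ 0
  · rw [if_pos hpos, PySem.List.pyRange_one_eq_nil (by omega)]
    rfl
  · rw [if_neg hpos]
    by_cases h1 : n = 1
    · subst h1
      rfl
    · have hn2 : 2 ≤ n := by omega
      have hb1 : (n == 1) = false := by simp [h1]
      rw [hb1]
      have hsplit : PySem.List.pyRange 0 n 1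
          = [0] ++ PySem.List.pyRange 1 (n - 1) 1 ++ [n - 1] := by
        have e3 : PySem.List.pyRange 0 1 1 = [0] := by
          have := PySem.List.pyRange_one_singleton (0 : Int)
          simpa using this
        have e4 : PySem.List.pyRange (n - 1) n 1 = [n - 1] := by
          have h2 : PySem.List.pyRange (n - 1) n 1
              = PySem.List.pyRange (n - 1) ((n - 1) + 1) 1 := by congr 1; omega
          rw [h2, PySem.List.pyRange_one_singleton]
        rw [PySem.List.pyRange_one_append 0 1 n (by omega) (by omega),
            PySem.List.pyRange_one_append 1 (n - 1) n (by omega) (by omega),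
            e3, e4, List.append_assoc]
      rw [hsplit]
      simp only [List.foldl_append, List.foldl_cons, List.foldl_nil]
      rw [foldA_middle]
      have hc0 : ((0 : Int) == 0 || (0 : Int) == n - 1) = true := by simp
      have hc1 : ((n - 1 : Int) == 0 || (n - 1 : Int) == n - 1) = true := by simp
      rw [hc0, hc1]
      simp [List.flatten_append, List.append_assoc]
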